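-- pv_equiv track=rewrite | github.com/oduwsdl/sumgram | sumgram/sumgram.py | indx_where_ngram_ends
-- ===== SOURCE A (Python) =====
-- def indx_where_ngram_ends(st_indx, ngram_toks, sent_toks):
--
--     '''
--
--         Case 1: where sent_toks contains stopwords making it hard to match ngram that already has stopwords removed:
--             Given st_index = 2 (sent_toks index where ngram_toks starts)
--             Given ngram_toks: ['orange', 'new', 'black']
--             Given sent_toks: ['best', 'is', 'orange', 'is', 'the', 'new', 'black']
--
--             The goal of this function is return 5: length of substring (['orange', 'is', 'the', 'new', 'black']) with stopwords that encompass ngram_toks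
--
--         Negative Case 1:
--             Given st_index = 5 (sent_toks index where ngram_toks starts)
--             Given ngram_toks: ['convention', 'center']
--             Given sent_toks: ['it', 'is', 'the', 'brown', 'r.', 'convention', 'center']
--
--             The goal of this function is return 2: length of substring ([convention', 'center']) without stopwords that encompass ngram_toks
--     '''
--
--     j = st_indx
--     length = 0
--     start = -1
--     match_count = 0
--
--     for i in range(len(ngram_toks)):
--
--         while j < len(sent_toks):
--
--             length += 1
--
--             ngram_tok = ngram_toks[i].strip().lower()
--             sent_tok = sent_toks[j].strip().lower()
--
--             #to avoid situations where sent_tok is has some additional characters (due to different formatting from ngram)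
--             #e.g., given ngram_tok "aransas", this should match sent_tok: "aransas'"
--             if( sent_tok.find(ngram_tok) != -1 ):
--
--                 if( start == -1 ):
--                     start = j
--
--                 j += 1
--                 match_count += 1
--
--                 break
--
--             j += 1
--
--     if( match_count == len(ngram_toks) ):
--         #all ngram_toks where found
--         return start, length
--     else:
--         return start, -1
-- ===== SOURCE B (Python) =====
-- def indx_where_ngram_ends(st_indx, ngram_toks, sent_toks):
--     if not ngram_toks:
--         return -1, 0
--     # pass 1: the lowered sentence window A would walk over
--     window = [sent_toks[j].strip().lower() for j in range(st_indx, len(sent_toks))]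
--     # pass 2: for every ngram token, the full list of matching offsets in the window
--     hits = []
--     for tok in ngram_toks:
--         t = tok.strip().lower()
--         hits.append([k for k, w in enumerate(window) if t in w])
--     # pass 3: chain greedily through the hit lists
--     prev = -1
--     start = -1
--     for hs in hits:
--         k = next((k for k in hs if k > prev), None)
--         if k is None:
--             return start, -1
--         if start == -1:
--             start = st_indx + k
--         prev = k
--     return start, prev + 1
-- ===== Notes on version B (the rewrite author's own statement) =====
-- stated objective: alternative
-- what changed: Replaces A's nested for-over-ngrams/while-over-sentence scan with three staged passes: precompute the lowered sentence window, build for every ngram token the full list of its matching offsets, then chain greedily through these hit lists taking from each the first offset past the previous match; start and length fall out of the chosen offsets in closed form.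
-- outside the precondition, e.g. on indx_where_ngram_ends(-3, ['a'], ['a']): A raises IndexError, B raises IndexError
import Mathlib
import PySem

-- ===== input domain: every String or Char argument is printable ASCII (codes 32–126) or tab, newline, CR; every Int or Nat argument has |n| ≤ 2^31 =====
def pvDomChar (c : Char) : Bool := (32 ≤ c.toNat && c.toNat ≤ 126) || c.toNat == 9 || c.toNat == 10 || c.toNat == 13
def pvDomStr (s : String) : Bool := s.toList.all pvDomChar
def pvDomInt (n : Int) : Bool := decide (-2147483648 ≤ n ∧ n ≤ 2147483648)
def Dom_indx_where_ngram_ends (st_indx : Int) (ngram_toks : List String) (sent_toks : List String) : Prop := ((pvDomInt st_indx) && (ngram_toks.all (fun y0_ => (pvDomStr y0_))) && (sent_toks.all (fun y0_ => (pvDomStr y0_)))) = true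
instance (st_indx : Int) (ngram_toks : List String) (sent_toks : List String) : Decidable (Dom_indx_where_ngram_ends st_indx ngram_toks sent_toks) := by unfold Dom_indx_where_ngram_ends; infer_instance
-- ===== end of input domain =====

-- B replaces A's nested for/while scan with staged passes: a precomputed lowered window,
-- per-token lists of ALL matching offsets, and a greedy chain through those hit lists.

-- ===== PORT A =====
-- inner 'while j < len(sent_toks)' loop of A; fuel = number of remaining indices (len - j)
def pvInnerA (sent : List String) (tok : String) : Nat → Int → Int → Int → (Int × Int × Int × Bool)
  | 0, j, length, start => (j, length, start, false)
  | Nat.succ n, j, length, start =>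
    let length' := length + 1
    let ntok := PySem.Str.lower (PySem.Str.strip tok)
    let stok := PySem.Str.lower (PySem.Str.strip ((PySem.List.pyGet? sent j).getD ""))
    if PySem.Str.find stok ntok ≠ -1 then
      (j + 1, length', (if start = -1 then j else start), true)
    else
      pvInnerA sent tok n (j + 1) length' start

-- one iteration of A's outer 'for i in range(len(ngram_toks))' loop; state (j, length, start, match_count)
def pvStepA (sent : List String) (acc : Int × Int × Int × Int) (tok : String) : Int × Int × Int × Int :=
  let r := pvInnerA sent tok ((sent.length : Int) - acc.1).toNat acc.1 acc.2.1 acc.2.2.1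
  (r.1, r.2.1, r.2.2.1, if r.2.2.2 then acc.2.2.2 + 1 else acc.2.2.2)

def indx_where_ngram_ends (st_indx : Int) (ngram_toks : List String) (sent_toks : List String) : Int × Int :=
  let r := ngram_toks.foldl (pvStepA sent_toks) (st_indx, 0, -1, 0)
  if r.2.2.2 = (ngram_toks.length : Int) then (r.2.2.1, r.2.1) else (r.2.2.1, -1)

-- ===== PORT B =====
-- '[sent_toks[j].strip().lower() for j in range(st_indx, len(sent_toks))]'
-- (pyGet? … getD "": exact whenever Python does not raise IndexError, i.e. on Pre_)
def pvWindow (st_indx : Int) (sent_toks : List String) : List String :=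
  (PySem.List.pyRange st_indx (sent_toks.length : Int) 1).map
    (fun j => PySem.Str.lower (PySem.Str.strip ((PySem.List.pyGet? sent_toks j).getD "")))

-- '[k for k, w in enumerate(window) if t in w]'
def pvHits (window : List String) (t : String) : List Int :=
  ((PySem.List.enumerate window 0).filter (fun p => PySem.Str.isIn t p.2)).map (fun p => p.1)

-- 'next((k for k in hs if k > prev), None)'
def pvNext (hs : List Int) (prev : Int) : Option Int := hs.find? (fun k => decide (prev < k))

-- B's 'for hs in hits:' chain; early return (start, -1) on a missing hit
def pvChain (st_indx : Int) : List (List Int) → Int → Int → (Int × Int)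
  | [], start, prev => (start, prev + 1)
  | hs :: rest, start, prev =>
    match pvNext hs prev with
    | none => (start, -1)
    | some k => pvChain st_indx rest (if start = -1 then st_indx + k else start) k

def indx_where_ngram_ends_alt (st_indx : Int) (ngram_toks : List String) (sent_toks : List String) : Int × Int :=
  if ngram_toks = [] then (-1, 0)
  else
    let window := pvWindow st_indx sent_toks
    let hits := ngram_toks.map (fun tok => pvHits window (PySem.Str.lower (PySem.Str.strip tok)))
    pvChain st_indx hits (-1) (-1)

-- ===== PRECONDITION & SPEC =====
-- Pre_ excludes only the inputs where Python A raises IndexError: a nonempty ngram with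
-- st_indx below -len(sent_toks), where sent_toks[j] is out of range (B raises there too).
def Pre_indx_where_ngram_ends (st_indx : Int) (ngram_toks : List String) (sent_toks : List String) : Prop :=
  ngram_toks = [] ∨ -(sent_toks.length : Int) ≤ st_indx
instance (st_indx : Int) (ngram_toks : List String) (sent_toks : List String) : Decidable (Pre_indx_where_ngram_ends st_indx ngram_toks sent_toks) := by unfold Pre_indx_where_ngram_ends; infer_instance
def pvWitness_indx_where_ngram_ends : Int × List String × List String := (0, ["orange", "new"], ["orange", "is", "new"])

def Spec_indx_where_ngram_ends (st_indx : Int) (ngram_toks : List String) (sent_toks : List String) (out : Int × Int) : Prop := out = indx_where_ngram_ends_alt st_indx ngram_toks sent_toks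
instance (st_indx : Int) (ngram_toks : List String) (sent_toks : List String) (out : Int × Int) : Decidable (Spec_indx_where_ngram_ends st_indx ngram_toks sent_toks out) := by unfold Spec_indx_where_ngram_ends; infer_instance

-- ===== CLAIM (what is proved, stated in full; the proofs are below) =====
def Claim_equal_indx_where_ngram_ends : Prop := ∀ (st_indx : Int) (ngram_toks : List String) (sent_toks : List String), Dom_indx_where_ngram_ends st_indx ngram_toks sent_toks → Pre_indx_where_ngram_ends st_indx ngram_toks sent_toks → Spec_indx_where_ngram_ends st_indx ngram_toks sent_toks (indx_where_ngram_ends st_indx ngram_toks sent_toks)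

-- ===== LEMMAS AND PROOFS =====

-- proof-side model: a single while-loop over the sentence consuming the pending lowered tokens
def pvLoopB (sent : List String) : Nat → List String → Int → Int → Int → (List String × Int × Int)
  | 0, rem, _, start, endv => (rem, start, endv)
  | Nat.succ n, rem, j, start, endv =>
    match rem with
    | [] => ([], start, endv)
    | t :: rest =>
      if PySem.Str.isIn t (PySem.Str.lower (PySem.Str.strip ((PySem.List.pyGet? sent j).getD ""))) then
        pvLoopB sent n rest (j + 1) (if start = -1 then j else start) j
      else
        pvLoopB sent n (t :: rest) (j + 1) start endv

lemma pv_find_iff_isIn (sub s : String) :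
    (PySem.Str.find s sub ≠ -1) ↔ PySem.Str.isIn sub s = true := by
  rw [PySem.Str.find_ne_neg_one_iff, PySem.Str.isIn_iff_infix]

lemma pvLoopB_nil (sent : List String) (f : Nat) (j start endv : Int) :
    pvLoopB sent f [] j start endv = ([], start, endv) := by
  cases f <;> simp [pvLoopB]

-- bookkeeping facts about A's inner loop
lemma pvInnerA_props (sent : List String) (tok : String) :
    ∀ (f : Nat) (j length start : Int),
      (pvInnerA sent tok f j length start).2.1 - length
          = (pvInnerA sent tok f j length start).1 - j
      ∧ ((pvInnerA sent tok f j length start).2.2.2 = false →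
          (pvInnerA sent tok f j length start).1 = j + f
          ∧ (pvInnerA sent tok f j length start).2.2.1 = start) := by
  intro f
  induction f with
  | zero => intro j length start; simp [pvInnerA]
  | succ n ih =>
    intro j length start
    simp only [pvInnerA]
    split
    · simp
    · have h := ih (j + 1) (length + 1) start
      refine ⟨by omega, fun hm => ?_⟩
      have h2 := h.2 hm
      exact ⟨by omega, h2.2⟩

-- once j has passed the end of sent, all remaining outer iterations of A are no-ops
lemma pv_foldA_stuck (sent : List String) :
    ∀ (ng : List String) (j length start mc : Int), (sent.length : Int) ≤ j →
      ng.foldl (pvStepA sent) (j, length, start, mc) = (j, length, start, mc) := by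
  intro ng
  induction ng with
  | nil => intro j length start mc _; rfl
  | cons t rest ih =>
    intro j length start mc hj
    have hf : ((sent.length : Int) - j).toNat = 0 := by omega
    simp only [List.foldl_cons, pvStepA, hf, pvInnerA]
    exact ih j length start mc hj

-- pvLoopB on (lowered tok :: rest) runs A's inner loop for tok, then continues
lemma pv_inner_eq (sent : List String) (tok : String) :
    ∀ (f : Nat) (j length start endv : Int) (rest : List String)
      (j' l' s' : Int) (m : Bool),
      f = ((sent.length : Int) - j).toNat →
      pvInnerA sent tok f j length start = (j', l', s', m) →
      pvLoopB sent f (PySem.Str.lower (PySem.Str.strip tok) :: rest) j start endv =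
        (if m then
          pvLoopB sent ((sent.length : Int) - j').toNat rest j' s' (j' - 1)
        else (PySem.Str.lower (PySem.Str.strip tok) :: rest, start, endv)) := by
  intro f
  induction f with
  | zero =>
    intro j length start endv rest j' l' s' m _ hA
    simp only [pvInnerA] at hA
    obtain ⟨rfl, rfl, rfl, rfl⟩ := Prod.mk.injEq .. ▸ hA
    simp [pvLoopB]
  | succ n ih =>
    intro j length start endv rest j' l' s' m hf hA
    have hn : n = ((sent.length : Int) - (j + 1)).toNat := by omega
    simp only [pvInnerA] at hA
    by_cases h : PySem.Str.find
        (PySem.Str.lower (PySem.Str.strip ((PySem.List.pyGet? sent j).getD "")))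
        (PySem.Str.lower (PySem.Str.strip tok)) = -1
    · rw [if_neg (not_not_intro h)] at hA
      have hb : ¬ (PySem.Str.isIn (PySem.Str.lower (PySem.Str.strip tok))
          (PySem.Str.lower (PySem.Str.strip ((PySem.List.pyGet? sent j).getD ""))) = true) :=
        fun ht => (pv_find_iff_isIn _ _).mpr ht h
      simp only [pvLoopB]
      rw [if_neg hb]
      exact ih (j + 1) (length + 1) start endv rest j' l' s' m hn hA
    · rw [if_pos h] at hA
      have hb : PySem.Str.isIn (PySem.Str.lower (PySem.Str.strip tok))
          (PySem.Str.lower (PySem.Str.strip ((PySem.List.pyGet? sent j).getD ""))) = true :=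
        (pv_find_iff_isIn _ _).mp h
      obtain ⟨rfl, rfl, rfl, rfl⟩ := Prod.mk.injEq .. ▸ hA
      simp only [pvLoopB]
      rw [if_pos hb, if_pos trivial, ← hn]
      have hj : j + 1 - 1 = j := by ring
      rw [hj]

-- the main correspondence between A's outer fold and the single loop pvLoopB
lemma pv_main (sent : List String) :
    ∀ (ng : List String) (j length start mc : Int) (f : Nat) (endv : Int),
      f = ((sent.length : Int) - j).toNat →
      (ng = [] → endv = j - 1) →
      (ng.foldl (pvStepA sent) (j, length, start, mc)).2.2.1
          = (pvLoopB sent f (ng.map (fun t => PySem.Str.lower (PySem.Str.strip t))) j start endv).2.1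
      ∧ ((pvLoopB sent f (ng.map (fun t => PySem.Str.lower (PySem.Str.strip t))) j start endv).1.length : Int)
          ≤ (ng.length : Int)
      ∧ (ng.foldl (pvStepA sent) (j, length, start, mc)).2.2.2
          = mc + (ng.length : Int)
            - ((pvLoopB sent f (ng.map (fun t => PySem.Str.lower (PySem.Str.strip t))) j start endv).1.length : Int)
      ∧ ((pvLoopB sent f (ng.map (fun t => PySem.Str.lower (PySem.Str.strip t))) j start endv).1 = [] →
          (ng.foldl (pvStepA sent) (j, length, start, mc)).2.1
            = length + ((pvLoopB sent f (ng.map (fun t => PySem.Str.lower (PySem.Str.strip t))) j start endv).2.2 + 1 - j)) := by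
  intro ng
  induction ng with
  | nil =>
    intro j length start mc f endv _ hend
    simp [pvLoopB_nil, hend rfl]
  | cons t rest ih =>
    intro j length start mc f endv hf _
    rcases hA : pvInnerA sent t f j length start with ⟨j', l', s', m⟩
    have hprops := pvInnerA_props sent t f j length start
    rw [hA] at hprops
    have hstep : pvStepA sent (j, length, start, mc) t = (j', l', s', if m then mc + 1 else mc) := by
      simp only [pvStepA]
      rw [← hf, hA]
    rw [List.map_cons, pv_inner_eq sent t f j length start endv _ j' l' s' m hf hA,
      List.foldl_cons, hstep]
    cases m with
    | true =>
      simp only [if_true]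
      obtain ⟨e1, e2, e3, e4⟩ :=
        ih j' l' s' (mc + 1) ((sent.length : Int) - j').toNat (j' - 1) rfl (fun _ => rfl)
      have hdelta : l' - length = j' - j := by simpa using hprops.1
      refine ⟨e1, ?_, ?_, ?_⟩
      · simp only [List.length_cons]
        push_cast
        omega
      · rw [e3]
        simp only [List.length_cons]
        push_cast
        omega
      · intro hnil
        have := e4 hnil
        omega
    | false =>
      simp only [Bool.false_eq_true, if_false]
      obtain ⟨hj', hs'⟩ := hprops.2 rfl
      subst hs'
      have hge : (sent.length : Int) ≤ j' := by omega
      rw [pv_foldA_stuck sent rest j' l' s' mc hge]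
      refine ⟨rfl, ?_, ?_, ?_⟩
      · simp only [List.length_cons, List.length_map]
        push_cast
        omega
      · simp only [List.length_cons, List.length_map]
        push_cast
        omega
      · intro hnil
        exact absurd hnil (by simp)

-- ---- B-side lemmas: hit lists, find?, and the chain ----

lemma pv_find?_congr {α : Type} (l : List α) (p q : α → Bool)
    (h : ∀ x ∈ l, p x = q x) : l.find? p = l.find? q := by
  induction l with
  | nil => rfl
  | cons x xs ih =>
    simp only [List.find?]
    rw [h x (List.mem_cons_self)]
    cases q x
    · exact ih (fun y hy => h y (List.mem_cons_of_mem _ hy))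
    · rfl

lemma pv_hits_mem (t : String) :
    ∀ (w : List String) (s k : Int),
      k ∈ ((PySem.List.enumerate w s).filter (fun p => PySem.Str.isIn t p.2)).map (fun p => p.1) →
      s ≤ k ∧ k < s + (w.length : Int) := by
  intro w s k hk
  simp only [List.mem_map, List.mem_filter] at hk
  obtain ⟨p, ⟨hp, _⟩, rfl⟩ := hk
  rw [PySem.List.mem_enumerate_iff] at hp
  obtain ⟨i, hi, rfl⟩ := hp
  refine ⟨by simp, ?_⟩
  omega

lemma pv_find_hits_none (t : String) (w : List String) (s q : Int)
    (h : s + (w.length : Int) ≤ q) :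
    (((PySem.List.enumerate w s).filter (fun p => PySem.Str.isIn t p.2)).map (fun p => p.1)).find?
      (fun k => decide (q ≤ k)) = none := by
  rw [List.find?_eq_none]
  intro k hk
  have := pv_hits_mem t w s k hk
  simp only [decide_eq_true_eq]
  omega

lemma pv_find_hits_step (t : String) :
    ∀ (w : List String) (s q : Int), s ≤ q → q < s + (w.length : Int) →
    (((PySem.List.enumerate w s).filter (fun p => PySem.Str.isIn t p.2)).map (fun p => p.1)).find?
        (fun k => decide (q ≤ k)) =
      (if PySem.Str.isIn t (w.getD (q - s).toNat "") then some q
       else (((PySem.List.enumerate w s).filter (fun p => PySem.Str.isIn t p.2)).map (fun p => p.1)).find?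
        (fun k => decide (q + 1 ≤ k))) := by
  intro w
  induction w with
  | nil =>
    intro s q h1 h2
    simp at h2
    omega
  | cons x xs ih =>
    intro s q h1 h2
    have h2' : q < s + 1 + (xs.length : Int) := by
      simp only [List.length_cons] at h2
      push_cast at h2 ⊢
      omega
    rw [PySem.List.enumerate_cons]
    by_cases hq : q = s
    · subst hq
      have ht0 : (q - q).toNat = 0 := by omega
      rw [ht0, List.getD_cons_zero]
      by_cases hx : PySem.Str.isIn t x = true
      · rw [if_pos hx]
        have hfil : List.filter (fun p => PySem.Str.isIn t p.2) ((q, x) :: PySem.List.enumerate xs (q + 1))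
            = (q, x) :: List.filter (fun p => PySem.Str.isIn t p.2) (PySem.List.enumerate xs (q + 1)) := by
          simp only [List.filter_cons, hx, if_true]
        rw [hfil, List.map_cons, List.find?_cons_of_pos (by simp)]
      · rw [if_neg hx]
        have hfil : List.filter (fun p => PySem.Str.isIn t p.2) ((q, x) :: PySem.List.enumerate xs (q + 1))
            = List.filter (fun p => PySem.Str.isIn t p.2) (PySem.List.enumerate xs (q + 1)) := by
          simp only [List.filter_cons, hx, Bool.false_eq_true, if_false]
        rw [hfil]
        exact pv_find?_congr _ _ _ (fun k hk => by
          have := pv_hits_mem t xs (q + 1) k hk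
          rw [decide_eq_decide]
          constructor <;> intro <;> omega)
    · have hs : s + 1 ≤ q := by omega
      have hgd : ((x :: xs).getD (q - s).toNat "") = xs.getD (q - (s + 1)).toNat "" := by
        have h3 : (q - s).toNat = (q - (s + 1)).toNat + 1 := by omega
        simp [h3]
      rw [hgd]
      by_cases hx : PySem.Str.isIn t x = true
      · have hfil : List.filter (fun p => PySem.Str.isIn t p.2) ((s, x) :: PySem.List.enumerate xs (s + 1))
            = (s, x) :: List.filter (fun p => PySem.Str.isIn t p.2) (PySem.List.enumerate xs (s + 1)) := by
          simp only [List.filter_cons, hx, if_true]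
        rw [hfil, List.map_cons,
          List.find?_cons_of_neg (by simp only [decide_eq_true_eq]; omega),
          List.find?_cons_of_neg (by simp only [decide_eq_true_eq]; omega)]
        exact ih (s + 1) q hs h2'
      · have hfil : List.filter (fun p => PySem.Str.isIn t p.2) ((s, x) :: PySem.List.enumerate xs (s + 1))
            = List.filter (fun p => PySem.Str.isIn t p.2) (PySem.List.enumerate xs (s + 1)) := by
          simp only [List.filter_cons, hx, Bool.false_eq_true, if_false]
        rw [hfil]
        exact ih (s + 1) q hs h2'

-- the window element at offset k is what the loop inspects at absolute index st + k
lemma pv_window_getD (st : Int) (sent : List String) (q : Int)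
    (h0 : 0 ≤ q) (h1 : q < ((sent.length : Int) - st)) :
    (pvWindow st sent).getD q.toNat ""
      = PySem.Str.lower (PySem.Str.strip ((PySem.List.pyGet? sent (st + q)).getD "")) := by
  unfold pvWindow
  have hq : q.toNat < (PySem.List.pyRange st (sent.length : Int) 1).length := by
    rw [PySem.List.length_pyRange_one]
    omega
  rw [List.getD_eq_getElem?_getD, List.getElem?_map,
    List.getElem?_eq_getElem hq]
  simp only [Option.map_some, Option.getD_some]
  rw [PySem.List.getElem_pyRange_one, Int.toNat_of_nonneg h0]

lemma pv_window_length (st : Int) (sent : List String) :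
    ((pvWindow st sent).length : Int) = ((sent.length : Int) - st).toNat := by
  unfold pvWindow
  rw [List.length_map, PySem.List.length_pyRange_one]

-- pvLoopB consuming one token = a find? over that token's hit list
lemma pv_loopB_eq_find (st : Int) (sent : List String) (t' : String) (rest : List String) :
    ∀ (f : Nat) (j start endv : Int), st ≤ j → f = ((sent.length : Int) - j).toNat →
      pvLoopB sent f (t' :: rest) j start endv =
        (match (pvHits (pvWindow st sent) t').find? (fun k => decide (j - st ≤ k)) with
         | none => (t' :: rest, start, endv)
         | some k => pvLoopB sent ((sent.length : Int) - (st + k + 1)).toNat rest (st + k + 1)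
             (if start = -1 then st + k else start) (st + k)) := by
  intro f
  induction f with
  | zero =>
    intro j start endv hj hf
    have hnone : (pvHits (pvWindow st sent) t').find? (fun k => decide (j - st ≤ k)) = none := by
      unfold pvHits
      apply pv_find_hits_none
      rw [pv_window_length]
      omega
    rw [hnone]
    simp [pvLoopB]
  | succ n ih =>
    intro j start endv hj hf
    have hjlt : j < (sent.length : Int) := by omega
    have hq0 : 0 ≤ j - st := by omega
    have hq1 : j - st < ((pvWindow st sent).length : Int) := by
      rw [pv_window_length]; omega
    have hstep := pv_find_hits_step t' (pvWindow st sent) 0 (j - st) (by omega)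
      (by rw [zero_add]; exact hq1)
    have hgd : (pvWindow st sent).getD (j - st - 0).toNat ""
        = PySem.Str.lower (PySem.Str.strip ((PySem.List.pyGet? sent j).getD "")) := by
      rw [show j - st - 0 = j - st by ring, pv_window_getD st sent (j - st) hq0 (by omega),
        show st + (j - st) = j by ring]
    rw [hgd] at hstep
    simp only [pvLoopB]
    by_cases hc : PySem.Str.isIn t'
        (PySem.Str.lower (PySem.Str.strip ((PySem.List.pyGet? sent j).getD ""))) = true
    · rw [if_pos hc]
      unfold pvHits
      rw [hstep, if_pos hc]
      show pvLoopB sent n rest (j + 1) (if start = -1 then j else start) j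
        = pvLoopB sent ((sent.length : Int) - (st + (j - st) + 1)).toNat rest (st + (j - st) + 1)
            (if start = -1 then st + (j - st) else start) (st + (j - st))
      rw [show st + (j - st) + 1 = j + 1 by ring, show st + (j - st) = j by ring,
        show ((sent.length : Int) - (j + 1)).toNat = n by omega]
    · rw [if_neg hc]
      unfold pvHits
      rw [hstep, if_neg hc]
      have := ih (j + 1) start endv (by omega) (by omega)
      unfold pvHits at this
      rw [this, show j + 1 - st = j - st + 1 by ring]

-- the greedy chain over the hit lists equals running pvLoopB over the pending tokens
lemma pv_chain_eq (st : Int) (sent : List String) :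
    ∀ (ls : List String) (prev start : Int), -1 ≤ prev →
      pvChain st (ls.map (fun t => pvHits (pvWindow st sent) t)) start prev
        = (if (pvLoopB sent ((sent.length : Int) - (st + prev + 1)).toNat ls (st + prev + 1) start (st + prev)).1 = []
           then ((pvLoopB sent ((sent.length : Int) - (st + prev + 1)).toNat ls (st + prev + 1) start (st + prev)).2.1,
                 (pvLoopB sent ((sent.length : Int) - (st + prev + 1)).toNat ls (st + prev + 1) start (st + prev)).2.2 - st + 1)
           else ((pvLoopB sent ((sent.length : Int) - (st + prev + 1)).toNat ls (st + prev + 1) start (st + prev)).2.1, -1)) := by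
  intro ls
  induction ls with
  | nil =>
    intro prev start _
    rw [List.map_nil, pvLoopB_nil]
    simp only [pvChain]
    congr 1
    omega
  | cons t' rest ih =>
    intro prev start hprev
    have hloop := pv_loopB_eq_find st sent t' rest
      (((sent.length : Int) - (st + prev + 1)).toNat) (st + prev + 1) start (st + prev)
      (by omega) rfl
    have hpred : (pvHits (pvWindow st sent) t').find? (fun k => decide (st + prev + 1 - st ≤ k))
        = pvNext (pvHits (pvWindow st sent) t') prev := by
      unfold pvNext
      exact pv_find?_congr _ _ _ (fun k _ => by
        rw [decide_eq_decide]
        constructor <;> intro <;> omega)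
    rw [hpred] at hloop
    rw [List.map_cons]
    simp only [pvChain]
    cases hfind : pvNext (pvHits (pvWindow st sent) t') prev with
    | none =>
      rw [hfind] at hloop
      rw [hloop]
      simp
    | some k =>
      rw [hfind] at hloop
      have hk0 : 0 ≤ k := by
        have hmem := List.mem_of_find?_eq_some hfind
        unfold pvHits at hmem
        exact (pv_hits_mem t' (pvWindow st sent) 0 k hmem).1
      rw [hloop]
      exact ih k (if start = -1 then st + k else start) (by omega)

-- ===== VERDICT (by name: the statement is the Claim_ definition above) =====
theorem indx_where_ngram_ends_spec : Claim_equal_indx_where_ngram_ends := by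
  intro st_indx ngram_toks sent_toks _ _
  unfold Spec_indx_where_ngram_ends
  cases ngram_toks with
  | nil => simp [indx_where_ngram_ends, indx_where_ngram_ends_alt]
  | cons t rest =>
    obtain ⟨e1, e2, e3, e4⟩ :=
      pv_main sent_toks (t :: rest) st_indx 0 (-1) 0
        ((sent_toks.length : Int) - st_indx).toNat (st_indx - 1) rfl (by simp)
    have hchain := pv_chain_eq st_indx sent_toks
      ((t :: rest).map (fun tok => PySem.Str.lower (PySem.Str.strip tok))) (-1) (-1) (by omega)
    rw [List.map_map] at hchain
    simp only [Function.comp_def] at hchain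
    simp only [indx_where_ngram_ends, indx_where_ngram_ends_alt]
    rw [if_neg (by simp : ¬(t :: rest = ([] : List String)))]
    have harg : st_indx + (-1) + 1 = st_indx := by ring
    have harg2 : st_indx + (-1) = st_indx - 1 := by ring
    rw [harg, harg2] at hchain
    rw [hchain]
    set r := pvLoopB sent_toks ((sent_toks.length : Int) - st_indx).toNat
      ((t :: rest).map (fun tok => PySem.Str.lower (PySem.Str.strip tok))) st_indx (-1) (st_indx - 1) with hr
    by_cases hnil : r.1 = []
    · have hmc : ((t :: rest).foldl (pvStepA sent_toks) (st_indx, 0, -1, 0)).2.2.2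
          = ((t :: rest).length : Int) := by
        rw [e3, hnil]
        simp
      rw [if_pos hmc, if_pos hnil]
      have h4 := e4 hnil
      exact Prod.ext e1 (by omega)
    · have hlen : 1 ≤ (r.1.length : Int) := by
        have := List.length_pos_iff.mpr hnil
        omega
      have hmc : ¬ (((t :: rest).foldl (pvStepA sent_toks) (st_indx, 0, -1, 0)).2.2.2
          = ((t :: rest).length : Int)) := by
        rw [e3]
        simp only [List.length_cons]
        push_cast
        omega
      rw [if_neg hmc, if_neg hnil]
      exact Prod.ext e1 rfl
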